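-- pv_equiv track=rewrite | github.com/shg9411/algo | algo_py/wootech/2.py | solution
-- ===== SOURCE A (Python) =====
-- def solution(s, op):
--     answer = []
--     l = len(s)
--     for i in range(1,l):
--         if op=="+":
--             answer.append(sum(map(int,(s[:i],s[i:]))))
--         elif op=="-":
--             answer.append(int(s[:i])-int(s[i:]))
--         else:
--             answer.append(int(s[:i])*int(s[i:]))
--     return answer
-- ===== SOURCE B (Python) =====
-- def solution(s, op):
--     # one pass left-to-right: pres[k] = int(s[:k+1]); one pass right-to-left:
--     # sufs[k] = int(s[k+1:]); then combine the two tables elementwise.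
--     pres = []
--     p = 0
--     for ch in s[:-1]:
--         p = p * 10 + int(ch)
--         pres.append(p)
--     sufs = []
--     q = 0
--     mul = 1
--     for ch in reversed(s[1:]):
--         q = q + int(ch) * mul
--         mul = mul * 10
--         sufs.append(q)
--     sufs.reverse()
--     if op == "+":
--         return [a + b for a, b in zip(pres, sufs)]
--     elif op == "-":
--         return [a - b for a, b in zip(pres, sufs)]
--     else:
--         return [a * b for a, b in zip(pres, sufs)]
-- ===== Notes on version B (the rewrite author's own statement) =====
-- stated objective: faster
-- what changed: Instead of re-slicing the string and re-parsing both halves with int() at every split point (each parse scans O(n) characters), B builds a prefix-value table in one left-to-right pass and a suffix-value table (with a running place multiplier) in one right-to-left pass, then combines the two tables elementwise with the operator.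
-- outside the precondition, e.g. on solution('1 2', '+'): A returns [3, 3], B raises ValueError
import Mathlib
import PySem

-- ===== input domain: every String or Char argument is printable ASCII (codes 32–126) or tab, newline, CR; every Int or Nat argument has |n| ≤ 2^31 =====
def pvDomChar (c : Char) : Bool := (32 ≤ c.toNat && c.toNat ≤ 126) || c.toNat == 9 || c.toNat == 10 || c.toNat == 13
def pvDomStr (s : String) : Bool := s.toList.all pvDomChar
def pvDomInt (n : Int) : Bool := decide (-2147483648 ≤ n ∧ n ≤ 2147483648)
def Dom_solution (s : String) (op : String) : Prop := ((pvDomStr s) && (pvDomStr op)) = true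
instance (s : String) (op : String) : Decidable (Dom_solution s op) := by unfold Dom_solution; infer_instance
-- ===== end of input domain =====

-- B replaces A's per-split re-slicing and re-parsing by two linear table-building passes
-- (prefix values left-to-right, suffix values right-to-left) combined elementwise: faster.
-- Side effects: neither version mutates its arguments.

-- ===== PORT A =====
-- hand port of Python's int(x) for base 10, restricted to all-digit strings: on the
-- digit-only inputs Pre_solution admits every slice parsed here is a nonempty digit string,
-- where int(x) is exactly this fold; none models the ValueError on anything else
-- (int()'s whitespace/sign/underscore tolerance is NOT modelled — Pre_solution excludes
-- the inputs where it would matter).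
def pyIntDigits? (cs : List Char) : Option Int :=
  if cs ≠ [] ∧ cs.all PySem.Chars.isdigit = true then
    some (cs.foldl (fun a c => a * 10 + ((c.toNat : Int) - 48)) 0)
  else none

def solution (s : String) (op : String) : List Int :=
  let cs := s.toList
  let l : Int := PySem.List.len cs
  (PySem.List.pyRange 1 l 1).foldl
    (fun answer i =>
      if op == "+" then
        -- sum(map(int, (s[:i], s[i:]))) = int(s[:i]) + int(s[i:])
        answer ++ [(pyIntDigits? (PySem.List.slice cs none (some i))).getD 0
                   + (pyIntDigits? (PySem.List.slice cs (some i) none)).getD 0]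
      else if op == "-" then
        answer ++ [(pyIntDigits? (PySem.List.slice cs none (some i))).getD 0
                   - (pyIntDigits? (PySem.List.slice cs (some i) none)).getD 0]
      else
        answer ++ [(pyIntDigits? (PySem.List.slice cs none (some i))).getD 0
                   * (pyIntDigits? (PySem.List.slice cs (some i) none)).getD 0])
    []

-- ===== PORT B =====
def solution_alt (s : String) (op : String) : List Int :=
  let cs := s.toList
  -- for ch in s[:-1]: p = p*10 + int(ch); pres.append(p)
  let pres := ((PySem.List.slice cs none (some (-1))).foldl
      (fun (st : List Int × Int) ch =>
        let p := st.2 * 10 + (pyIntDigits? [ch]).getD 0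
        (st.1 ++ [p], p)) ([], 0)).1
  -- for ch in reversed(s[1:]): q = q + int(ch)*mul; mul = mul*10; sufs.append(q); then sufs.reverse()
  let sufs := (((PySem.List.slice cs (some 1) none).reverse.foldl
      (fun (st : List Int × (Int × Int)) ch =>
        let q := st.2.1 + (pyIntDigits? [ch]).getD 0 * st.2.2
        (st.1 ++ [q], (q, st.2.2 * 10))) ([], (0, 1))).1).reverse
  if op == "+" then (pres.zip sufs).map (fun ab => ab.1 + ab.2)
  else if op == "-" then (pres.zip sufs).map (fun ab => ab.1 - ab.2)
  else (pres.zip sufs).map (fun ab => ab.1 * ab.2)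

-- ===== PRECONDITION & SPEC =====
-- Pre_ excludes strings of length ≥ 2 containing a non-digit character: there Python A
-- either raises ValueError at some split or (thanks to int()'s whitespace/sign/underscore
-- tolerance, e.g. '1 2') returns a value, while B's per-character parsing raises ValueError.
def Pre_solution (s : String) (op : String) : Prop :=
  s.toList.length ≤ 1 ∨ s.toList.all PySem.Chars.isdigit = true
instance (s : String) (op : String) : Decidable (Pre_solution s op) := by
  unfold Pre_solution; infer_instance
def pvWitness_solution : String × String := ("123", "+")

def Spec_solution (s : String) (op : String) (out : List Int) : Prop := out = solution_alt s op
instance (s : String) (op : String) (out : List Int) : Decidable (Spec_solution s op out) := by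
  unfold Spec_solution; infer_instance

-- ===== CLAIM (what is proved, stated in full; the proofs are below) =====
def Claim_equal_solution : Prop :=
  ∀ (s : String) (op : String), Dom_solution s op → Pre_solution s op →
    Spec_solution s op (solution s op)

-- ===== LEMMAS AND PROOFS =====

-- digit value and base-10 value of a digit list, relative to an accumulator
def pvD (c : Char) : Int := (c.toNat : Int) - 48
def pvValFrom (p : Int) (cs : List Char) : Int := cs.foldl (fun a c => a * 10 + pvD c) p

theorem pvValFrom_nil (p : Int) : pvValFrom p [] = p := rfl
theorem pvValFrom_cons (p : Int) (c : Char) (t : List Char) :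
    pvValFrom p (c :: t) = pvValFrom (p * 10 + pvD c) t := rfl
theorem pvValFrom_append_singleton (p : Int) (l : List Char) (c : Char) :
    pvValFrom p (l ++ [c]) = pvValFrom p l * 10 + pvD c := by
  simp [pvValFrom, List.foldl_append]

theorem pv_ite_false {α : Type} [inst : Decidable False] (a b : α) :
    (if False then a else b) = b := by
  cases inst with
  | isFalse h => rfl
  | isTrue h => exact absurd h id

theorem pyIntDigits?_eq (cs : List Char) (hne : cs ≠ [])
    (hd : cs.all PySem.Chars.isdigit = true) :
    pyIntDigits? cs = some (pvValFrom 0 cs) := by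
  simp [pyIntDigits?, hne, hd, pvValFrom, pvD]

theorem pyIntDigits?_singleton (c : Char) (hc : PySem.Chars.isdigit c = true) :
    (pyIntDigits? [c]).getD 0 = pvD c := by
  simp [pyIntDigits?, hc, pvD]

-- a foldl that only appends is a map
theorem foldl_app {α β : Type} (l : List α) (f : α → β) (init : List β) :
    l.foldl (fun acc x => acc ++ [f x]) init = init ++ l.map f := by
  induction l generalizing init with
  | nil => simp
  | cons a t ih => simp [List.foldl_cons, ih]

-- the prefix-table loop of B
theorem pres_spec (ds : List Char) (acc : List Int) (p : Int)
    (hd : ∀ c ∈ ds, PySem.Chars.isdigit c = true) :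
    ds.foldl (fun (st : List Int × Int) ch =>
        let q := st.2 * 10 + (pyIntDigits? [ch]).getD 0
        (st.1 ++ [q], q)) (acc, p)
      = (acc ++ (List.range ds.length).map (fun k => pvValFrom p (ds.take (k + 1))),
         pvValFrom p ds) := by
  induction ds generalizing acc p with
  | nil => simp [pvValFrom]
  | cons c t ih =>
    have hc : PySem.Chars.isdigit c = true := hd c (List.mem_cons_self ..)
    have ht : ∀ x ∈ t, PySem.Chars.isdigit x = true := fun x hx => hd x (List.mem_cons_of_mem _ hx)
    simp only [List.foldl_cons, pyIntDigits?_singleton c hc]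
    rw [ih _ _ ht]
    rw [List.length_cons, List.range_succ_eq_map, List.map_cons, List.map_map,
        List.append_assoc, List.singleton_append]
    refine Prod.ext ?_ ?_
    · simp [Function.comp_def, Nat.succ_eq_add_one, List.take_succ_cons, List.take_zero,
        pvValFrom_cons, pvValFrom_nil]
    · simp [pvValFrom_cons]

-- the suffix-table loop of B
theorem sufs_spec (rs : List Char) (acc : List Int) (q m : Int)
    (hd : ∀ c ∈ rs, PySem.Chars.isdigit c = true) :
    (rs.foldl (fun (st : List Int × (Int × Int)) ch =>
        let q' := st.2.1 + (pyIntDigits? [ch]).getD 0 * st.2.2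
        (st.1 ++ [q'], (q', st.2.2 * 10))) (acc, (q, m))).1
      = acc ++ (List.range rs.length).map
          (fun j => q + m * pvValFrom 0 ((rs.take (j + 1)).reverse)) := by
  induction rs generalizing acc q m with
  | nil => simp
  | cons c t ih =>
    have hc : PySem.Chars.isdigit c = true := hd c (List.mem_cons_self ..)
    have ht : ∀ x ∈ t, PySem.Chars.isdigit x = true := fun x hx => hd x (List.mem_cons_of_mem _ hx)
    simp only [List.foldl_cons, pyIntDigits?_singleton c hc]
    rw [ih _ _ _ ht]
    rw [List.length_cons, List.range_succ_eq_map, List.map_cons, List.map_map,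
        List.append_assoc, List.singleton_append]
    congr 1
    congr 1
    · simp only [List.take_succ_cons, List.take_zero, List.reverse_cons, List.reverse_nil,
        List.nil_append, pvValFrom_cons, pvValFrom_nil]
      ring
    · apply List.map_congr_left
      intro j _
      simp only [Function.comp_def, Nat.succ_eq_add_one, List.take_succ_cons,
        List.reverse_cons, pvValFrom_append_singleton]
      ring

-- (l.reverse.take j).reverse = l.drop (l.length - j)
theorem rev_take_rev {α : Type} (l : List α) (j : Nat) (hj : j ≤ l.length) :
    (l.reverse.take j).reverse = l.drop (l.length - j) := by
  apply List.ext_getElem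
  · simp [List.length_take]
    omega
  · intro i h1 h2
    simp only [List.getElem_reverse, List.getElem_take, List.getElem_drop,
      List.length_take, List.length_reverse] at h1 h2 ⊢
    congr 1
    omega

-- A's loop, with the per-split parses replaced by prefix/suffix values
theorem hA_side (cs : List Char) (hall : cs.all PySem.Chars.isdigit = true)
    (f : Int → Int → Int) :
    (PySem.List.pyRange 1 (PySem.List.len cs) 1).foldl
      (fun ans i => ans ++
        [f ((pyIntDigits? (PySem.List.slice cs none (some i))).getD 0)
           ((pyIntDigits? (PySem.List.slice cs (some i) none)).getD 0)]) []
    = (List.range (cs.length - 1)).map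
        (fun k => f (pvValFrom 0 (cs.take (k + 1))) (pvValFrom 0 (cs.drop (k + 1)))) := by
  have hm : (((cs.length : Int)) - 1).toNat = cs.length - 1 := by omega
  rw [PySem.List.len_eq, PySem.List.pyRange_one, hm, List.foldl_map, foldl_app,
      List.nil_append]
  apply List.map_congr_left
  intro k hk
  have hk' : k < cs.length - 1 := List.mem_range.mp hk
  have hcast : (1 : Int) + (k : Int) = ((k + 1 : Nat) : Int) := by push_cast; ring
  rw [hcast, PySem.List.slice_to_natCast, PySem.List.slice_from_natCast]
  have htne : cs.take (k + 1) ≠ [] := by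
    apply List.ne_nil_of_length_pos
    simp [List.length_take]
    omega
  have hdne : cs.drop (k + 1) ≠ [] := by
    apply List.ne_nil_of_length_pos
    simp [List.length_drop]
    omega
  have htd : (cs.take (k + 1)).all PySem.Chars.isdigit = true := by
    rw [List.all_eq_true] at hall ⊢
    exact fun c hc => hall c ((List.take_sublist _ _).subset hc)
  have hdd : (cs.drop (k + 1)).all PySem.Chars.isdigit = true := by
    rw [List.all_eq_true] at hall ⊢
    exact fun c hc => hall c ((List.drop_sublist _ _).subset hc)
  rw [pyIntDigits?_eq _ htne htd, pyIntDigits?_eq _ hdne hdd]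
  rfl

-- B's prefix table as values of the splits' left halves
theorem hB_pres (cs : List Char) (hall : cs.all PySem.Chars.isdigit = true) :
    ((PySem.List.slice cs none (some (-1))).foldl
      (fun (st : List Int × Int) ch =>
        let p := st.2 * 10 + (pyIntDigits? [ch]).getD 0
        (st.1 ++ [p], p)) ([], 0)).1
    = (List.range (cs.length - 1)).map (fun k => pvValFrom 0 (cs.take (k + 1))) := by
  rw [PySem.List.slice_to_neg_one]
  have hd : ∀ c ∈ cs.dropLast, PySem.Chars.isdigit c = true := by
    rw [List.all_eq_true] at hall
    exact fun c hc => hall c ((List.dropLast_sublist _).subset hc)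
  rw [pres_spec _ _ _ hd]
  simp only [List.nil_append, List.length_dropLast]
  apply List.map_congr_left
  intro k hk
  have hk' : k < cs.length - 1 := List.mem_range.mp hk
  congr 1
  rw [List.dropLast_eq_take, List.take_take]
  congr 1
  omega

-- B's suffix table (built reversed, then reversed) as values of the splits' right halves
theorem hB_sufs (cs : List Char) (hall : cs.all PySem.Chars.isdigit = true) :
    (((PySem.List.slice cs (some 1) none).reverse.foldl
      (fun (st : List Int × (Int × Int)) ch =>
        let q := st.2.1 + (pyIntDigits? [ch]).getD 0 * st.2.2
        (st.1 ++ [q], (q, st.2.2 * 10))) ([], (0, 1))).1).reverse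
    = (List.range (cs.length - 1)).map (fun k => pvValFrom 0 (cs.drop (k + 1))) := by
  rw [PySem.List.slice_from_one]
  have hd : ∀ c ∈ cs.tail.reverse, PySem.Chars.isdigit c = true := by
    rw [List.all_eq_true] at hall
    intro c hc
    exact hall c ((List.tail_sublist _).subset (List.mem_reverse.mp hc))
  rw [sufs_spec _ _ _ _ hd]
  simp only [List.nil_append]
  apply List.ext_getElem
  · simp
  · intro i h1 h2
    have hk : i < cs.length - 1 := by simpa using h2
    rw [List.getElem_reverse]
    simp only [List.length_map, List.length_range, List.length_reverse, List.length_tail,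
      List.getElem_map, List.getElem_range]
    have hj : cs.length - 1 - 1 - i + 1 = cs.length - 1 - i := by omega
    rw [hj]
    rw [rev_take_rev cs.tail (cs.length - 1 - i) (by simp only [List.length_tail]; omega)]
    have h3 : cs.tail.length - (cs.length - 1 - i) = i := by simp only [List.length_tail]; omega
    rw [h3]
    have h4 : cs.tail.drop i = cs.drop (i + 1) := by
      cases cs with
      | nil => simp
      | cons a l => simp [List.drop_succ_cons]
    rw [h4]
    ring

-- the two sides agree on all-digit strings
theorem main_digits (s op : String) (hall : s.toList.all PySem.Chars.isdigit = true) :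
    solution s op = solution_alt s op := by
  have hzip : ∀ f : Int → Int → Int,
      ((((List.range (s.toList.length - 1)).map
            (fun k => pvValFrom 0 (s.toList.take (k + 1)))).zip
         ((List.range (s.toList.length - 1)).map
            (fun k => pvValFrom 0 (s.toList.drop (k + 1))))).map
        (fun ab => f ab.1 ab.2))
      = (List.range (s.toList.length - 1)).map
          (fun k => f (pvValFrom 0 (s.toList.take (k + 1))) (pvValFrom 0 (s.toList.drop (k + 1)))) := by
    intro f
    rw [List.zip_map', List.map_map]
    simp [Function.comp_def]
  by_cases h1 : op = "+"
  · subst h1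
    simp only [solution, solution_alt, beq_self_eq_true, if_pos]
    rw [hB_pres _ hall, hB_sufs _ hall, hzip]
    exact hA_side _ hall (fun a b => a + b)
  · by_cases h2 : op = "-"
    · subst h2
      have e1 : (("-" : String) == "+") = false := by decide
      simp only [solution, solution_alt, e1, beq_self_eq_true, Bool.false_eq_true,
        pv_ite_false, if_pos]
      rw [hB_pres _ hall, hB_sufs _ hall, hzip]
      exact hA_side _ hall (fun a b => a - b)
    · have e1 : (op == "+") = false := beq_eq_false_iff_ne.mpr h1
      have e2 : (op == "-") = false := beq_eq_false_iff_ne.mpr h2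
      simp only [solution, solution_alt, e1, e2, Bool.false_eq_true, pv_ite_false]
      rw [hB_pres _ hall, hB_sufs _ hall, hzip]
      exact hA_side _ hall (fun a b => a * b)

-- the two sides agree on strings of length ≤ 1 (both loops are empty)
theorem main_short (s op : String) (hn : s.toList.length ≤ 1) :
    solution s op = solution_alt s op := by
  have hr : PySem.List.pyRange 1 (PySem.List.len s.toList) 1 = [] := by
    rw [PySem.List.len_eq]
    exact PySem.List.pyRange_one_eq_nil (by omega)
  have hdl : s.toList.dropLast = [] := by
    rw [List.dropLast_eq_take]
    have h0 : s.toList.length - 1 = 0 := by omega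
    rw [h0, List.take_zero]
  simp only [solution, solution_alt, hr, List.foldl_nil, PySem.List.slice_to_neg_one, hdl]
  simp

-- ===== VERDICT (by name: the statement is the Claim_ definition above) =====
theorem solution_spec : Claim_equal_solution := by
  intro s op _ hpre
  unfold Spec_solution
  rcases hpre with hn | hall
  · exact main_short s op hn
  · exact main_digits s op hall
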